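-- pv_equiv track=rewrite | github.com/H4rr1ss/-LFP-Proyecto1-202103718 | database.py | __validaciones_alfabeto
-- ===== SOURCE A (Python) =====
-- def __validaciones_alfabeto(lista_alfabeto, lista_estados):
--     ''' || Verifica que el alfabeto ingresado ningun simbolo se repita 2 veces ||'''
--     for h in lista_alfabeto:
--         if lista_alfabeto.count(h) > 1:
--             return False
--
--         for a in lista_estados:
--             if h == a:
--                 return False
--     return True
-- ===== SOURCE B (Python) =====
-- def __validaciones_alfabeto(lista_alfabeto, lista_estados):
--     ''' || Verifica que el alfabeto ingresado ningun simbolo se repita 2 veces ||'''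
--     s = set(lista_alfabeto)
--     return len(s) == len(lista_alfabeto) and s.isdisjoint(lista_estados)
-- ===== Notes on version B (the rewrite author's own statement) =====
-- stated objective: idiomatic
-- what changed: Replaced the per-symbol count scan and the nested loop over states with one set built once, checked by cardinality (no duplicates) and isdisjoint (no overlap with states).
import Mathlib
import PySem

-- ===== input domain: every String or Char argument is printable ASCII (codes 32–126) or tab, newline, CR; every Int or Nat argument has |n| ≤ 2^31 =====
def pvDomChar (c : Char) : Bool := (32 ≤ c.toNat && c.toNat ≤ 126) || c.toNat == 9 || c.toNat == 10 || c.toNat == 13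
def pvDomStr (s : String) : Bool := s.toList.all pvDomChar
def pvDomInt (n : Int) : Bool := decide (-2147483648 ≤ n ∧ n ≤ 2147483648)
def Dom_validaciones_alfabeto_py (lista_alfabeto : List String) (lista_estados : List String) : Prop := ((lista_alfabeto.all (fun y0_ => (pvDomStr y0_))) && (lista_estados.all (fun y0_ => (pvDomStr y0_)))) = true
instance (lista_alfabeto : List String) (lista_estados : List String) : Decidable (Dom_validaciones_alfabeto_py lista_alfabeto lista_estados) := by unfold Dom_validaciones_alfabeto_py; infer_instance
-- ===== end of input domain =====

-- B replaces A's per-symbol count scan and nested state loop with one set checked by cardinality and disjointness (idiomatic).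

-- ===== PORT A =====
-- the outer 'for h in lista_alfabeto' loop with its early returns
def pvAGo (lista_alfabeto : List String) (lista_estados : List String) : List String → Bool
  | [] => true
  | h :: rest =>
      if PySem.List.count lista_alfabeto h > 1 then false
      else if lista_estados.any (fun a => h == a) then false
      else pvAGo lista_alfabeto lista_estados rest

def validaciones_alfabeto_py (lista_alfabeto : List String) (lista_estados : List String) : Bool :=
  pvAGo lista_alfabeto lista_estados lista_alfabeto

-- ===== PORT B =====
def validaciones_alfabeto_py_alt (lista_alfabeto : List String) (lista_estados : List String) : Bool :=
  let s : PySem.Set String := PySem.Set.ofList lista_alfabeto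
  (PySem.Set.len s == (lista_alfabeto.length : Int)) && PySem.Set.isdisjoint s lista_estados

-- ===== PRECONDITION & SPEC =====
def Spec_validaciones_alfabeto_py (lista_alfabeto : List String) (lista_estados : List String) (out : Bool) : Prop := out = validaciones_alfabeto_py_alt lista_alfabeto lista_estados
instance (lista_alfabeto : List String) (lista_estados : List String) (out : Bool) : Decidable (Spec_validaciones_alfabeto_py lista_alfabeto lista_estados out) := by unfold Spec_validaciones_alfabeto_py; infer_instance

-- ===== CLAIM (what is proved, stated in full; the proofs are below) =====
def Claim_equal_validaciones_alfabeto_py : Prop := ∀ (lista_alfabeto : List String) (lista_estados : List String), Dom_validaciones_alfabeto_py lista_alfabeto lista_estados → Spec_validaciones_alfabeto_py lista_alfabeto lista_estados (validaciones_alfabeto_py lista_alfabeto lista_estados)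

-- ===== LEMMAS AND PROOFS =====

theorem pvAGo_eq_true_iff (la ls xs : List String) :
    pvAGo la ls xs = true ↔ ∀ h ∈ xs, PySem.List.count la h ≤ 1 ∧ h ∉ ls := by
  induction xs with
  | nil => simp [pvAGo]
  | cons h rest ih =>
    simp only [pvAGo]
    split_ifs with h1 h2
    · simp only [false_iff]
      intro hall
      exact absurd (hall h (by simp)).1 (by omega)
    · simp only [false_iff]
      intro hall
      rcases List.any_eq_true.mp h2 with ⟨a, ha, hba⟩
      exact (hall h (by simp)).2 (beq_iff_eq.mp hba ▸ ha)
    · rw [ih]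
      constructor
      · intro hall h' hh'
        rcases List.mem_cons.mp hh' with rfl | hm
        · exact ⟨by omega, fun hmem => h2 (List.any_eq_true.mpr ⟨h', hmem, beq_iff_eq.mpr rfl⟩)⟩
        · exact hall h' hm
      · intro hall h' hh' ; exact hall h' (List.mem_cons_of_mem _ hh')

theorem pvOfList_sublist (xs : List String) : (PySem.Set.ofList xs).Sublist xs := by
  induction xs using List.reverseRecOn with
  | nil => simp [PySem.Set.ofList_nil]
  | append_singleton ys y ih =>
    rw [PySem.Set.ofList_append_singleton, PySem.Set.add_eq_ite]
    split_ifs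
    · exact ih.trans (List.sublist_append_left ys [y])
    · exact ih.append (List.Sublist.refl [y])

theorem pvLen_iff_nodup (xs : List String) :
    (PySem.Set.ofList xs).length = xs.length ↔ xs.Nodup := by
  constructor
  · intro hlen
    have := (pvOfList_sublist xs).eq_of_length hlen
    simpa [this] using PySem.Set.nodup_ofList (xs := xs)
  · intro hnd
    rw [PySem.Set.ofList_eq_self_of_nodup _ hnd]

-- ===== VERDICT (by name: the statement is the Claim_ definition above) =====
theorem validaciones_alfabeto_py_spec : Claim_equal_validaciones_alfabeto_py := by
  intro la ls _
  unfold Spec_validaciones_alfabeto_py validaciones_alfabeto_py validaciones_alfabeto_py_alt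
  simp only []
  rw [Bool.eq_iff_iff, pvAGo_eq_true_iff, Bool.and_eq_true, beq_iff_eq]
  rw [PySem.Set.isdisjoint_iff]
  constructor
  · intro hall
    refine ⟨?_, ?_⟩
    · have hnd : la.Nodup := List.nodup_iff_count_le_one.mpr (fun h => by
        by_cases hm : h ∈ la
        · simpa using (hall h hm).1
        · simp [List.count_eq_zero_of_not_mem hm])
      have := (pvLen_iff_nodup la).mpr hnd
      simp [PySem.Set.len, this]
    · intro x hx
      exact (hall x ((PySem.Set.mem_ofList _ _).mp hx)).2
  · rintro ⟨hlen, hdis⟩ h hm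
    have hnd : la.Nodup := (pvLen_iff_nodup la).mp (by
      have := hlen
      simp [PySem.Set.len] at this
      exact_mod_cast this)
    refine ⟨?_, hdis h ((PySem.Set.mem_ofList _ _).mpr hm)⟩
    simpa using List.nodup_iff_count_le_one.mp hnd h
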